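-- pv_equiv track=rewrite | github.com/MaxDGU/MLSP20 | utilities/NewGroup.py | windowAlg
-- ===== SOURCE A (Python) =====
-- def windowAlg(wind, maxReps):
--     if (len(wind) == 0):
--         return [];
--     X_n = list();
--     curr_list = [wind[0]]
--     for curr in wind[1:]:
--         if ((curr_list[-1] == curr) and (len(curr_list) < maxReps)):
--             curr_list.append(curr)
--         else:
--             X_n.append(curr_list)
--             curr_list = [curr]
--     if (curr_list):
--         X_n.append(curr_list)
--     return X_n
-- ===== SOURCE B (Python) =====
-- def windowAlg(wind, maxReps):
--     # group-then-chunk: find each maximal run of equal elements, then split it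
--     # into consecutive chunks of size step = max(maxReps, 1)
--     step = maxReps if maxReps >= 1 else 1
--     out = []
--     i = 0
--     n = len(wind)
--     while i < n:
--         j = i
--         while j < n and wind[j] == wind[i]:
--             j += 1
--         run = wind[i:j]
--         while run:
--             out.append(run[:step])
--             run = run[step:]
--         i = j
--     return out
-- ===== Notes on version B (the rewrite author's own statement) =====
-- stated objective: alternative
-- what changed: Replaced A's single fused accumulator loop (growing a current run element by element and flushing it on mismatch or cap) with a two-phase group-then-chunk decomposition: first scan out each maximal run of consecutive equal elements, then slice that run into chunks of size max(maxReps,1).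
import Mathlib
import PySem

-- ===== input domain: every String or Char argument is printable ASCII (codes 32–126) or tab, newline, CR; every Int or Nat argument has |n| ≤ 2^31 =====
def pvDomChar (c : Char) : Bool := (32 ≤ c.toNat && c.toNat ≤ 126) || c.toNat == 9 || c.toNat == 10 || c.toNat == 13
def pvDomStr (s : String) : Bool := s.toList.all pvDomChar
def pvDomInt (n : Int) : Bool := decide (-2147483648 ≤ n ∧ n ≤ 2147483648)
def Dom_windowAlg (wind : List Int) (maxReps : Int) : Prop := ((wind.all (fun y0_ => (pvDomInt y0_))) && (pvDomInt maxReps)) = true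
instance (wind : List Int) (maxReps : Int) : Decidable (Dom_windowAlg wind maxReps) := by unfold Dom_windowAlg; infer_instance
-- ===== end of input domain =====

-- B replaces A's fused accumulator loop with a group-then-chunk two-pass decomposition
-- (alternative structure, same O(n) cost); return value only, no mutation involved.

-- ===== PORT A =====
-- the for-loop over wind[1:] with state (X_n, curr_list), as structural recursion
def windowAlgGo (maxReps : Int) (acc : List (List Int)) (cur : List Int) :
    List Int → List (List Int)
  | [] => if cur ≠ [] then acc ++ [cur] else acc   -- the trailing `if curr_list:` flush
  | c :: t =>
      if cur.getLast? = some c ∧ (cur.length : Int) < maxReps then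
        windowAlgGo maxReps acc (cur ++ [c]) t
      else
        windowAlgGo maxReps (acc ++ [cur]) [c] t

def windowAlg (wind : List Int) (maxReps : Int) : List (List Int) :=
  match wind with
  | [] => []
  | h :: t => windowAlgGo maxReps [] [h] t

-- ===== PORT B =====
-- inner while-loop of Source B: peel chunks of `step` elements off the front of a run
def chunkB (step : Nat) : List Int → List (List Int)
  | [] => []
  | h :: t => (h :: t.take (step - 1)) :: chunkB step (t.drop (step - 1))
  termination_by l => l.length
  decreasing_by simp

-- outer while-loop of Source B: scan out one maximal run, chunk it, continue after it
def windowAlgAltGo (step : Nat) : List Int → List (List Int)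
  | [] => []
  | h :: t =>
      chunkB step (h :: t.takeWhile (· == h)) ++ windowAlgAltGo step (t.dropWhile (· == h))
  termination_by l => l.length
  decreasing_by simp; have := List.length_dropWhile_le (· == h) t; omega

def windowAlg_alt (wind : List Int) (maxReps : Int) : List (List Int) :=
  windowAlgAltGo (if 1 ≤ maxReps then maxReps.toNat else 1) wind

-- ===== PRECONDITION & SPEC =====
def Spec_windowAlg (wind : List Int) (maxReps : Int) (out : List (List Int)) : Prop := out = windowAlg_alt wind maxReps
instance (wind : List Int) (maxReps : Int) (out : List (List Int)) : Decidable (Spec_windowAlg wind maxReps out) := by unfold Spec_windowAlg; infer_instance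

-- ===== CLAIM (what is proved, stated in full; the proofs are below) =====
def Claim_equal_windowAlg : Prop := ∀ (wind : List Int) (maxReps : Int), Dom_windowAlg wind maxReps → Spec_windowAlg wind maxReps (windowAlg wind maxReps)

-- ===== LEMMAS AND PROOFS =====

-- head of dropWhile fails the predicate
theorem head?_dropWhile_false (p : Int → Bool) :
    ∀ (t : List Int) (c : Int), (t.dropWhile p).head? = some c → p c = false := by
  intro t
  induction t with
  | nil => simp [List.dropWhile]
  | cons a t ih =>
    intro c h
    by_cases hp : p a = true
    · exact ih c (by simpa [List.dropWhile, hp] using h)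
    · have hpf : p a = false := by simpa using hp
      simp [List.dropWhile, hpf] at h
      rw [← h]; exact hpf

theorem getLast?_replicate_pos (x : Int) (j : Nat) (h : 1 ≤ j) :
    (List.replicate j x).getLast? = some x := by
  obtain ⟨j', rfl⟩ : ∃ j', j = j' + 1 := ⟨j - 1, by omega⟩
  induction j' with
  | zero => rfl
  | succ k ih => rw [List.replicate_succ, List.getLast?_cons]; simp_all [List.replicate_succ]

-- chunkB on a short nonempty run yields that run as a single chunk
theorem chunkB_replicate_short (step j : Nat) (x : Int) (h1 : 1 ≤ j) (h2 : j ≤ step) :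
    chunkB step (List.replicate j x) = [List.replicate j x] := by
  obtain ⟨j', rfl⟩ : ∃ j', j = j' + 1 := ⟨j - 1, by omega⟩
  rw [List.replicate_succ, chunkB, List.take_replicate, List.drop_replicate]
  rw [min_eq_right (by omega), Nat.sub_eq_zero_of_le (by omega)]
  simp [chunkB]

-- chunkB on step + n copies peels one full chunk
theorem chunkB_replicate_peel (step n : Nat) (x : Int) (hs : 1 ≤ step) :
    chunkB step (List.replicate (step + n) x) =
      List.replicate step x :: chunkB step (List.replicate n x) := by
  have h : step + n = (step - 1 + n) + 1 := by omega
  rw [h, List.replicate_succ, chunkB, List.take_replicate, List.drop_replicate]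
  rw [min_eq_left (by omega)]
  have h2 : step - 1 + n - (step - 1) = n := by omega
  rw [h2]
  obtain ⟨s', rfl⟩ : ∃ s', step = s' + 1 := ⟨step - 1, by omega⟩
  simp [List.replicate_succ]

-- A's length-cap test is `j < step` on a nonempty current run
theorem cap_iff (maxReps : Int) (step : Nat)
    (hstep : step = if 1 ≤ maxReps then maxReps.toNat else 1)
    (j : Nat) (h1 : 1 ≤ j) : ((j : Int) < maxReps ↔ j < step) := by
  split at hstep <;> omega

-- A's loop across one run of equal values, with cur = j copies of x
theorem windowAlgGo_run (maxReps : Int) (step : Nat)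
    (hstep : step = if 1 ≤ maxReps then maxReps.toNat else 1)
    (m : Nat) (x : Int) :
    ∀ (j : Nat) (acc : List (List Int)) (cont : List Int),
      1 ≤ j → j ≤ step → (∀ c, cont.head? = some c → c ≠ x) →
      windowAlgGo maxReps acc (List.replicate j x) (List.replicate m x ++ cont) =
        (match cont with
         | [] => acc ++ chunkB step (List.replicate (j + m) x)
         | c :: t => windowAlgGo maxReps (acc ++ chunkB step (List.replicate (j + m) x)) [c] t) := by
  induction m with
  | zero =>
    intro j acc cont h1 h2 hcont
    match cont with
    | [] =>
      simp only [List.replicate_zero, Nat.add_zero, List.append_nil, windowAlgGo]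
      rw [if_pos (by simp [List.replicate_eq_nil_iff]; omega),
        chunkB_replicate_short step j x h1 h2]
    | c :: t =>
      have hcx : c ≠ x := hcont c rfl
      simp only [List.replicate_zero, List.nil_append, Nat.add_zero]
      rw [windowAlgGo]
      rw [if_neg (by simp [getLast?_replicate_pos x j h1]; intro h; exact absurd h.symm hcx)]
      rw [chunkB_replicate_short step j x h1 h2]
  | succ m ih =>
    intro j acc cont h1 h2 hcont
    rw [List.replicate_succ, List.cons_append, windowAlgGo]
    by_cases hj : j < step
    · rw [if_pos ⟨getLast?_replicate_pos x j h1, by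
        rw [List.length_replicate]; exact (cap_iff maxReps step hstep j h1).mpr hj⟩]
      rw [← List.replicate_succ']
      have := ih (j + 1) acc cont (by omega) (by omega) hcont
      rw [this]
      have harith : j + 1 + m = j + (m + 1) := by omega
      rw [harith]
    · rw [if_neg (by
        rw [List.length_replicate]
        intro ⟨_, hlt⟩
        exact hj ((cap_iff maxReps step hstep j h1).mp hlt))]
      have hjs : j = step := by omega
      rw [hjs]
      have hs1 : 1 ≤ step := by omega
      have := ih 1 (acc ++ [List.replicate step x]) cont (by omega) (by omega) hcont
      simp only [List.replicate_one] at this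
      rw [this]
      have hpeel : chunkB step (List.replicate (step + (m + 1)) x)
          = List.replicate step x :: chunkB step (List.replicate (1 + m) x) := by
        have h3 : step + (m + 1) = step + (1 + m) := by omega
        rw [h3, chunkB_replicate_peel step (1 + m) x hs1]
      rw [hpeel]
      match cont with
      | [] => simp
      | c :: t => simp

theorem windowAlgGo_main (maxReps : Int) (step : Nat)
    (hstep : step = if 1 ≤ maxReps then maxReps.toNat else 1) :
    ∀ (n : Nat) (wind : List Int), wind.length ≤ n → ∀ (h : Int) (t : List Int), wind = h :: t →
      ∀ acc, windowAlgGo maxReps acc [h] t = acc ++ windowAlgAltGo step (h :: t) := by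
  intro n
  induction n with
  | zero => intro wind hlen h t heq; subst heq; simp at hlen
  | succ n ih =>
    intro wind hlen h t heq acc
    subst heq
    have hsplit : t = t.takeWhile (· == h) ++ t.dropWhile (· == h) :=
      (List.takeWhile_append_dropWhile).symm
    have hrep : t.takeWhile (· == h) = List.replicate (t.takeWhile (· == h)).length h := by
      apply List.eq_replicate_of_mem
      intro b hb
      have := List.mem_takeWhile_imp hb
      simpa using this
    have hhead : ∀ c, (t.dropWhile (· == h)).head? = some c → c ≠ h := by
      intro c hc
      have := head?_dropWhile_false (· == h) t c hc
      simpa using this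
    have hs1 : 1 ≤ step := by split at hstep <;> omega
    have hrun := windowAlgGo_run maxReps step hstep (t.takeWhile (· == h)).length h 1 acc
      (t.dropWhile (· == h)) (by omega) hs1 hhead
    simp only [List.replicate_one] at hrun
    rw [windowAlgAltGo]
    have hhr : h :: t.takeWhile (· == h) = List.replicate (1 + (t.takeWhile (· == h)).length) h := by
      rw [Nat.add_comm, List.replicate_succ, ← hrep]
    conv_lhs => rw [hsplit, hrep]
    rw [hrun, hhr]
    match hdw : t.dropWhile (· == h) with
    | [] => simp [windowAlgAltGo]
    | c :: t' =>
      have hlen' : (c :: t').length ≤ n := by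
        have := List.length_dropWhile_le (· == h) t
        rw [hdw] at this
        simp at hlen
        omega
      show windowAlgGo maxReps
          (acc ++ chunkB step (List.replicate (1 + (t.takeWhile (· == h)).length) h)) [c] t' = _
      rw [ih (c :: t') hlen' c t' rfl]
      simp

-- ===== VERDICT (by name: the statement is the Claim_ definition above) =====
theorem windowAlg_spec : Claim_equal_windowAlg := by
  intro wind maxReps _
  unfold Spec_windowAlg windowAlg windowAlg_alt
  match wind with
  | [] => simp [windowAlgAltGo]
  | h :: t => exact windowAlgGo_main maxReps _ rfl (h :: t).length (h :: t) le_rfl h t rfl []
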